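-- pv_equiv track=rewrite | github.com/pjot/advent-of-code | 2018/15/15.py | bounds
-- ===== SOURCE A (Python) =====
-- def bounds(grid):
--     xmi, xma = 0, 0
--     ymi, yma = 0, 0
--     for x, y in grid.keys():
--         xmi = min(xmi, x)
--         xma = max(xma, x)
--         ymi = min(ymi, y)
--         yma = max(yma, y)
--     return xmi, xma, ymi, yma
-- ===== SOURCE B (Python) =====
-- def bounds(grid):
--     xs = sorted([0] + [x for x, y in grid.keys()])
--     ys = sorted([0] + [y for x, y in grid.keys()])
--     return xs[0], xs[-1], ys[0], ys[-1]
-- ===== Notes on version B (the rewrite author's own statement) =====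
-- stated objective: alternative
-- what changed: Replaces A's single fused scan with four interleaved min/max updates by sorting the 0-seeded x and y coordinate lists and reading each bound off the sorted lists' endpoints.
import Mathlib
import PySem

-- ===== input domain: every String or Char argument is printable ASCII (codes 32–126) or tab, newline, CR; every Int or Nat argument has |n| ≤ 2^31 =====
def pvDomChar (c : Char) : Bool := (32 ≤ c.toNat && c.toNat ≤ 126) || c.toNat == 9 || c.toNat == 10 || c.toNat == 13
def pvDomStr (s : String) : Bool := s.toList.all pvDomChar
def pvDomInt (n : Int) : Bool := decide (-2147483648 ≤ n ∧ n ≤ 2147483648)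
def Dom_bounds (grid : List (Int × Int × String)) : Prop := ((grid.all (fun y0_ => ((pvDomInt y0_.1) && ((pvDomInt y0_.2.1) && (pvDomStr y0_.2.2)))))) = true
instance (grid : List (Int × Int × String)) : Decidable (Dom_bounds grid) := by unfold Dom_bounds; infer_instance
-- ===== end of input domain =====

-- B replaces A's single fused min/max scan by sorting the 0-seeded coordinate
-- lists and reading each bound off the sorted lists' endpoints (objective: alternative).

-- ===== PORT A =====
-- A: one fold over the keys updating (xmi, xma, ymi, yma) together.
def bounds (grid : List (Int × Int × String)) : Int × Int × Int × Int :=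
  grid.foldl
    (fun st kv =>
      let x := kv.1
      let y := kv.2.1
      (min st.1 x, max st.2.1 x, min st.2.2.1 y, max st.2.2.2 y))
    (0, 0, 0, 0)

-- ===== PORT B =====
-- B: sort [0]+xs and [0]+ys, return endpoints xs[0], xs[-1], ys[0], ys[-1].
-- The sorted lists are nonempty (they contain the seed 0), so the Option
-- returned by pyGet? is always some; .getD 0 only makes the port total.
def bounds_alt (grid : List (Int × Int × String)) : Int × Int × Int × Int :=
  let xs := PySem.List.sorted ((0 : Int) :: grid.map (fun kv => kv.1)) (fun v => v) false
  let ys := PySem.List.sorted ((0 : Int) :: grid.map (fun kv => kv.2.1)) (fun v => v) false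
  ((PySem.List.pyGet? xs 0).getD 0, (PySem.List.pyGet? xs (-1)).getD 0,
   (PySem.List.pyGet? ys 0).getD 0, (PySem.List.pyGet? ys (-1)).getD 0)

-- ===== PRECONDITION & SPEC =====
def Spec_bounds (grid : List (Int × Int × String)) (out : Int × Int × Int × Int) : Prop := out = bounds_alt grid
instance (grid : List (Int × Int × String)) (out : Int × Int × Int × Int) : Decidable (Spec_bounds grid out) := by unfold Spec_bounds; infer_instance

-- ===== CLAIM (what is proved, stated in full; the proofs are below) =====
def Claim_equal_bounds : Prop := ∀ (grid : List (Int × Int × String)), Dom_bounds grid → Spec_bounds grid (bounds grid)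

-- ===== LEMMAS AND PROOFS =====

theorem bounds_loop_eq (grid : List (Int × Int × String)) (a b c d : Int) :
    grid.foldl
      (fun st (kv : Int × Int × String) =>
        let x := kv.1
        let y := kv.2.1
        (min st.1 x, max st.2.1 x, min st.2.2.1 y, max st.2.2.2 y))
      (a, b, c, d)
    = ((grid.map (fun kv => kv.1)).foldl min a,
       (grid.map (fun kv => kv.1)).foldl max b,
       (grid.map (fun kv => kv.2.1)).foldl min c,
       (grid.map (fun kv => kv.2.1)).foldl max d) := by
  induction grid generalizing a b c d with
  | nil => rfl
  | cons hd tl ih => simp [List.foldl, ih]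

theorem foldl_min_mem (l : List Int) (a : Int) : l.foldl min a ∈ a :: l := by
  induction l generalizing a with
  | nil => simp
  | cons h t ih =>
    show List.foldl min (min a h) t ∈ a :: h :: t
    rcases List.mem_cons.mp (ih (min a h)) with he | he
    · rcases min_choice a h with hc | hc
      · rw [he, hc]; exact List.mem_cons_self
      · rw [he, hc]; simp
    · simp [he]

theorem foldl_min_le (l : List Int) (a : Int) : ∀ y ∈ a :: l, l.foldl min a ≤ y := by
  induction l generalizing a with
  | nil => intro y hy; simp at hy; simp [hy]
  | cons h t ih =>
    intro y hy
    show List.foldl min (min a h) t ≤ y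
    have hbase := ih (min a h) (min a h) (by simp)
    rcases List.mem_cons.mp hy with rfl | hy'
    · exact le_trans hbase (min_le_left _ _)
    · rcases List.mem_cons.mp hy' with rfl | hy''
      · exact le_trans hbase (min_le_right _ _)
      · exact ih (min a h) y (by simp [hy''])

theorem foldl_max_mem (l : List Int) (a : Int) : l.foldl max a ∈ a :: l := by
  induction l generalizing a with
  | nil => simp
  | cons h t ih =>
    show List.foldl max (max a h) t ∈ a :: h :: t
    rcases List.mem_cons.mp (ih (max a h)) with he | he
    · rcases max_choice a h with hc | hc
      · rw [he, hc]; exact List.mem_cons_self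
      · rw [he, hc]; simp
    · simp [he]

theorem foldl_le_max (l : List Int) (a : Int) : ∀ y ∈ a :: l, y ≤ l.foldl max a := by
  induction l generalizing a with
  | nil => intro y hy; simp at hy; simp [hy]
  | cons h t ih =>
    intro y hy
    show y ≤ List.foldl max (max a h) t
    have hbase := ih (max a h) (max a h) (by simp)
    rcases List.mem_cons.mp hy with rfl | hy'
    · exact le_trans (le_max_left _ _) hbase
    · rcases List.mem_cons.mp hy' with rfl | hy''
      · exact le_trans (le_max_right _ _) hbase
      · exact ih (max a h) y (by simp [hy''])

-- the last element of a ≤-sorted list dominates every element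
theorem pairwise_le_mem_le_getLast (s : List Int) (hs : s.Pairwise (fun a b => a ≤ b))
    (h : s ≠ []) : ∀ y ∈ s, y ≤ s.getLast h := by
  induction s with
  | nil => cases h rfl
  | cons x t ih =>
    intro y hy
    cases t with
    | nil => simp at hy; simp [hy, List.getLast]
    | cons z u =>
      have hp := List.pairwise_cons.mp hs
      rcases List.mem_cons.mp hy with rfl | hy'
      · have hlast : (z :: u).getLast (by simp) ∈ z :: u := List.getLast_mem _
        have := ih hp.2 (by simp) _ hlast
        have hx : y ≤ (z :: u).getLast (by simp) :=
          le_trans (hp.1 _ hlast) le_rfl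
        simpa [List.getLast] using hx
      · have := ih hp.2 (by simp) _ hy'
        simpa [List.getLast] using this

theorem pyGet_zero (s : List Int) (h : s ≠ []) :
    (PySem.List.pyGet? s 0).getD 0 = s.head h := by
  cases s with
  | nil => cases h rfl
  | cons x t => simp [PySem.List.pyGet?, PySem.List.pyIdx?]

theorem pyGet_neg_one (s : List Int) (h : s ≠ []) :
    (PySem.List.pyGet? s (-1)).getD 0 = s.getLast h := by
  cases s with
  | nil => cases h rfl
  | cons x t =>
    have hlt : (x :: t).length - 1 < (x :: t).length := by simp
    simp [PySem.List.pyGet?, PySem.List.pyIdx?, List.getLast_eq_getElem]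
    rfl

-- head of sorted(a::l) = foldl min a l
theorem sorted_head_eq_foldl_min (l : List Int) (a : Int) :
    (PySem.List.pyGet? (PySem.List.sorted (a :: l) (fun v => v) false) 0).getD 0
      = l.foldl min a := by
  have hne : PySem.List.sorted (a :: l) (fun v => v) false ≠ [] := by
    simp [PySem.List.sorted_eq_nil_iff]
  obtain ⟨m, t, hst⟩ := List.exists_cons_of_ne_nil hne
  rw [pyGet_zero _ hne]
  have hperm : (PySem.List.sorted (a :: l) (fun v => v) false).Perm (a :: l) :=
    PySem.List.sorted_perm _ _ _
  have hmem_s : m ∈ a :: l := hperm.mem_iff.mp (by simp [hst])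
  have hmin_mem : l.foldl min a ∈ a :: l := foldl_min_mem l a
  have hh := PySem.List.key_head_sorted_le (xs := a :: l) (key := fun v => v) hst
  have hle : m ≤ l.foldl min a := hh _ hmin_mem
  have hge : l.foldl min a ≤ m := foldl_min_le l a _ hmem_s
  simp [hst, le_antisymm hle hge]

-- last of sorted(a::l) = foldl max a l
theorem sorted_last_eq_foldl_max (l : List Int) (a : Int) :
    (PySem.List.pyGet? (PySem.List.sorted (a :: l) (fun v => v) false) (-1)).getD 0
      = l.foldl max a := by
  have hne : PySem.List.sorted (a :: l) (fun v => v) false ≠ [] := by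
    simp [PySem.List.sorted_eq_nil_iff]
  rw [pyGet_neg_one _ hne]
  have hperm : (PySem.List.sorted (a :: l) (fun v => v) false).Perm (a :: l) :=
    PySem.List.sorted_perm _ _ _
  have hpair : (PySem.List.sorted (a :: l) (fun v => v) false).Pairwise
      (fun u v => u ≤ v) := by
    simpa using PySem.List.sorted_pairwise (xs := a :: l) (key := fun v => v)
  have hlast_mem : (PySem.List.sorted (a :: l) (fun v => v) false).getLast hne ∈ a :: l :=
    hperm.mem_iff.mp (List.getLast_mem hne)
  have hmax_mem : l.foldl max a ∈ PySem.List.sorted (a :: l) (fun v => v) false :=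
    hperm.mem_iff.mpr (foldl_max_mem l a)
  have h1 := foldl_le_max l a _ hlast_mem
  have h2 := pairwise_le_mem_le_getLast _ hpair hne _ hmax_mem
  exact le_antisymm h1 h2

-- ===== VERDICT (by name: the statement is the Claim_ definition above) =====
theorem bounds_spec : Claim_equal_bounds := by
  intro grid _
  unfold Spec_bounds bounds bounds_alt
  rw [bounds_loop_eq]
  simp only [sorted_head_eq_foldl_min, sorted_last_eq_foldl_max]
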